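-- pv_equiv track=rewrite | github.com/vhsw/CodeMasters_Tourney | Python 3/greatestCommonPrimeDivisor.py | greatestCommonPrimeDivisor
-- ===== SOURCE A (Python) =====
-- def greatestCommonPrimeDivisor(a, b):
--     def is_prime(x):
--         for i in range(2, x // 2 + 1):
--             if x % i == 0:
--                 return False
--         return True
--     for i in reversed(range(2, min(a, b))):
--         if a % i == 0 and b % i == 0 and is_prime(i):
--             return i
--     return -1
-- ===== SOURCE B (Python) =====
-- def greatestCommonPrimeDivisor(a, b):
--     # gcd by Euclid, then largest prime factor of the gcd by trial division.
--     g, r = abs(a), abs(b)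
--     while r:
--         g, r = r, g % r
--     best = -1
--     d = 2
--     while d * d <= g:
--         if g % d == 0:
--             g //= d
--             best = d
--         else:
--             d += 1
--     return g if g > 1 else best
-- ===== Notes on version B (the rewrite author's own statement) =====
-- stated objective: faster
-- what changed: A scans all candidates downward from min(a,b) with a trial-division primality test inside each step; B computes gcd(a,b) by Euclid's algorithm and then factors the gcd once by trial division up to its square root, returning the largest prime factor.
-- intended difference: When every common prime divisor is excluded by A's exclusive upper bound range(2, min(a,b)) (min(a,b) <= 2, or min(a,b) is prime and divides both, e.g. a = b = 7), A returns -1 even though a common prime divisor exists; B returns that largest common prime divisor, which is the intended answer. — e.g. on greatestCommonPrimeDivisor(7, 7): A returns -1, B returns 7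
import Mathlib
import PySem

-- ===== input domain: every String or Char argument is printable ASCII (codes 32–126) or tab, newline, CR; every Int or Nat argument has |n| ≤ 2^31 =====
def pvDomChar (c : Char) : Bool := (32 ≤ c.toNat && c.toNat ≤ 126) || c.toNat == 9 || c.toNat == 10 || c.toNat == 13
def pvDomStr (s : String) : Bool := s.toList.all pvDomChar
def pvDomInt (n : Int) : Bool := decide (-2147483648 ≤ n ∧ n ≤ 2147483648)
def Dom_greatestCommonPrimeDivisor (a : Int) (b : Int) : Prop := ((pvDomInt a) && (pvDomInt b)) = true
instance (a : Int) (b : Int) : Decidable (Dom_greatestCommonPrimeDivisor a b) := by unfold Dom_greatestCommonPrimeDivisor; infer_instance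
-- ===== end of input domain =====

-- B replaces A's downward scan over all candidates (with a trial-division primality
-- test inside) by Euclid's gcd followed by one trial-division factorisation of the
-- gcd; objective: faster (asymptotic).

-- ===== PORT A =====
def pvIsPrimeLoop (x : Int) : List Int → Bool
  | [] => true
  | i :: rest => if PySem.Int.mod x i == 0 then false else pvIsPrimeLoop x rest

def pvIsPrime (x : Int) : Bool :=
  pvIsPrimeLoop x (PySem.List.pyRange 2 (PySem.Int.floordiv x 2 + 1) 1)

def pvFindA (a : Int) (b : Int) : List Int → Int
  | [] => -1
  | i :: rest =>
      if PySem.Int.mod a i == 0 && PySem.Int.mod b i == 0 && pvIsPrime i then i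
      else pvFindA a b rest

def greatestCommonPrimeDivisor (a : Int) (b : Int) : Int :=
  pvFindA a b ((PySem.List.pyRange 2 (min a b) 1).reverse)

-- ===== PORT B =====
-- `while r: g, r = r, g % r` (operands are nonnegative after abs(), so Nat `%`/`/`
-- coincide exactly with Python's `%`/`//` here)
def pvGcd (g : Nat) (r : Nat) : Nat :=
  if r = 0 then g else pvGcd r (g % r)
termination_by r
decreasing_by exact Nat.mod_lt _ (by omega)

-- `while d*d <= g: ...`; the extra `2 ≤ d` in the guard is a totality guard only
-- (every call site has d ≥ 2) so the recursion is well founded.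
def pvLpf (g : Nat) (d : Nat) (best : Int) : Int :=
  if h : 2 ≤ d ∧ d * d ≤ g then
    if hd : g % d = 0 then pvLpf (g / d) d (d : Int)
    else pvLpf g (d + 1) best
  else if 1 < g then (g : Int) else best
termination_by (g, g - d)
decreasing_by
  · left
    exact Nat.div_lt_self (by nlinarith [h.1, h.2]) (by omega)
  · right
    have : d < g := by nlinarith [h.1, h.2]
    omega

def greatestCommonPrimeDivisor_alt (a : Int) (b : Int) : Int :=
  pvLpf (pvGcd a.natAbs b.natAbs) 2 (-1)

-- ===== PRECONDITION & SPEC =====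
-- When every common prime divisor of a and b is excluded by A's exclusive upper
-- bound range(2, min(a, b)) — i.e. min(a,b) ≤ 2, or min(a,b) is itself the only
-- common prime — A returns -1 although a common prime divisor exists; B returns
-- that largest common prime divisor, which is the intended answer.
def D_greatestCommonPrimeDivisor (a : Int) (b : Int) : Prop :=
  2 ≤ Int.gcd a b ∧
    (min a b ≤ 2 ∨ (Nat.Prime (min a b).toNat ∧ min a b ∣ a ∧ min a b ∣ b))
instance (a : Int) (b : Int) : Decidable (D_greatestCommonPrimeDivisor a b) := by
  unfold D_greatestCommonPrimeDivisor; infer_instance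

def Spec_greatestCommonPrimeDivisor (a : Int) (b : Int) (out : Int) : Prop :=
  ¬ D_greatestCommonPrimeDivisor a b → out = greatestCommonPrimeDivisor_alt a b
instance (a : Int) (b : Int) (out : Int) : Decidable (Spec_greatestCommonPrimeDivisor a b out) := by
  unfold Spec_greatestCommonPrimeDivisor; infer_instance

def pvDiffWitness_greatestCommonPrimeDivisor : Int × Int := (7, 7)
def pvDiffWitnessOut_greatestCommonPrimeDivisor : Int × Int := (-1, 7)

-- ===== CLAIM (what is proved, stated in full; the proofs are below) =====
def Claim_unchanged_greatestCommonPrimeDivisor : Prop := ∀ (a : Int) (b : Int), Dom_greatestCommonPrimeDivisor a b → Spec_greatestCommonPrimeDivisor a b (greatestCommonPrimeDivisor a b)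
def Claim_changed_greatestCommonPrimeDivisor : Prop := Dom_greatestCommonPrimeDivisor (pvDiffWitness_greatestCommonPrimeDivisor.1) (pvDiffWitness_greatestCommonPrimeDivisor.2) ∧ D_greatestCommonPrimeDivisor (pvDiffWitness_greatestCommonPrimeDivisor.1) (pvDiffWitness_greatestCommonPrimeDivisor.2) ∧ greatestCommonPrimeDivisor (pvDiffWitness_greatestCommonPrimeDivisor.1) (pvDiffWitness_greatestCommonPrimeDivisor.2) = pvDiffWitnessOut_greatestCommonPrimeDivisor.1 ∧ greatestCommonPrimeDivisor_alt (pvDiffWitness_greatestCommonPrimeDivisor.1) (pvDiffWitness_greatestCommonPrimeDivisor.2) = pvDiffWitnessOut_greatestCommonPrimeDivisor.2 ∧ pvDiffWitnessOut_greatestCommonPrimeDivisor.1 ≠ pvDiffWitnessOut_greatestCommonPrimeDivisor.2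
def Claim_exact_greatestCommonPrimeDivisor : Prop := ∀ (a : Int) (b : Int), Dom_greatestCommonPrimeDivisor a b → D_greatestCommonPrimeDivisor a b → greatestCommonPrimeDivisor a b ≠ greatestCommonPrimeDivisor_alt a b

-- ===== LEMMAS AND PROOFS =====

theorem pvGcd_eq_gcd (g r : Nat) : pvGcd g r = Nat.gcd g r := by
  fun_induction pvGcd g r with
  | case1 _ => simp
  | case2 g r h ih =>
      rw [ih, Nat.gcd_comm r (g % r), ← Nat.gcd_rec r g, Nat.gcd_comm]

theorem pvLpf_one (d : Nat) (best : Int) (hd : 2 ≤ d) : pvLpf 1 d best = best := by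
  rw [pvLpf]
  have h1 : ¬ (2 ≤ d ∧ d * d ≤ 1) := by rintro ⟨h2, h3⟩; nlinarith
  rw [dif_neg h1]; norm_num

theorem pvLpf_zero (best : Int) : pvLpf 0 2 best = best := by
  rw [pvLpf]; norm_num

-- main invariant of B's factorisation loop
theorem pvLpf_eq (g d : Nat) (best : Int) (q : Nat) (hq : q.Prime) (hd : 2 ≤ d)
    (hfac : ∀ p : Nat, p.Prime → p ∣ g → d ≤ p)
    (hqg : q ∣ g)
    (hmax : ∀ p : Nat, p.Prime → p ∣ g → p ≤ q) :
    pvLpf g d best = (q : Int) := by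
  fun_induction pvLpf g d best with
  | case1 g d best h hmod ih =>
      -- d divides g; d is prime (its least factor is a prime factor of g, hence ≥ d)
      have hg0 : 0 < g := by nlinarith [h.1, h.2]
      have hddvd : d ∣ g := Nat.dvd_of_mod_eq_zero hmod
      have hdp : d.Prime := by
        have hmf := Nat.minFac_prime (show d ≠ 1 by omega)
        have h1 : d ≤ d.minFac := hfac _ hmf (dvd_trans (Nat.minFac_dvd d) hddvd)
        have h2 : d.minFac ≤ d := Nat.minFac_le (by omega)
        have he : d.minFac = d := by omega
        rwa [he] at hmf
      have hgd : g / d ∣ g := Nat.div_dvd_of_dvd hddvd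
      have hgd0 : 0 < g / d := Nat.div_pos (Nat.le_of_dvd hg0 hddvd) (by omega)
      have hcancel : g / d * d = g := Nat.div_mul_cancel hddvd
      by_cases hone : g / d = 1
      · -- g = d, so q = d
        have hgdd : g = d := by rw [hone, one_mul] at hcancel; omega
        have hqd : q = d := (Nat.prime_dvd_prime_iff_eq hq hdp).mp (hgdd ▸ hqg)
        rw [hone, pvLpf_one d _ (by omega), hqd]
      · have hgd2 : 2 ≤ g / d := by omega
        have hqgd : q ∣ g / d := by
          by_contra hnot
          have hqmul : q ∣ g / d * d := by rw [hcancel]; exact hqg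
          rcases (Nat.Prime.dvd_mul hq).mp hqmul with hok | hqd
          · exact hnot hok
          · -- q = d; but g/d still has a prime factor between d and q
            have hqd' : q = d := (Nat.prime_dvd_prime_iff_eq hq hdp).mp hqd
            have hmf := Nat.minFac_prime (show g / d ≠ 1 by omega)
            have h1 : d ≤ (g / d).minFac := hfac _ hmf (dvd_trans (Nat.minFac_dvd _) hgd)
            have h2 : (g / d).minFac ≤ q := hmax _ hmf (dvd_trans (Nat.minFac_dvd _) hgd)
            have he : (g / d).minFac = d := by omega
            apply hnot
            rw [hqd']
            conv_lhs => rw [← he]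
            exact Nat.minFac_dvd (g / d)
        exact ih hd (fun p hp hpd => hfac p hp (dvd_trans hpd hgd)) hqgd
          (fun p hp hpd => hmax p hp (dvd_trans hpd hgd))
  | case2 g d best h hmod ih =>
      apply ih (by omega)
      · intro p hp hpd
        have h1 := hfac p hp hpd
        have h2 : p ≠ d := by
          rintro rfl
          exact hmod (Nat.mod_eq_zero_of_dvd hpd)
        omega
      · exact hqg
      · exact hmax
  | case3 g d best h hg1 =>
      -- d*d > g and g > 1: g itself is the largest (and only remaining) prime factor
      have hgq : q ≤ g := Nat.le_of_dvd (by omega) hqg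
      have hdq : d ≤ q := hfac q hq hqg
      rcases Nat.lt_or_ge q g with hlt | hge
      · exfalso
        obtain ⟨t, ht⟩ := hqg
        have ht1 : t ≠ 1 := by rintro rfl; omega
        have ht0 : t ≠ 0 := by rintro rfl; omega
        have hmf := Nat.minFac_prime ht1
        have hmfd : t.minFac ∣ g := ht ▸ Dvd.dvd.mul_left (Nat.minFac_dvd t) q
        have h1 : d ≤ t.minFac := hfac _ hmf hmfd
        have h2 : t.minFac ≤ t := Nat.minFac_le (by omega)
        have hbig : d * d ≤ g := by nlinarith
        exact h ⟨hd, hbig⟩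
      · have he : q = g := by omega
        rw [he]
  | case4 g d best h hg1 =>
      exfalso
      have hg01 : g = 0 ∨ g = 1 := by omega
      rcases hg01 with rfl | rfl
      · obtain ⟨p, hpgt, hpp⟩ := Nat.exists_infinite_primes (q + 1)
        have := hmax p hpp (dvd_zero p)
        omega
      · exact absurd (Nat.eq_one_of_dvd_one hqg) hq.ne_one

theorem pvIsPrimeLoop_iff (x : Int) (L : List Int) :
    pvIsPrimeLoop x L = true ↔ ∀ i ∈ L, ¬ PySem.Int.mod x i = 0 := by
  induction L with
  | nil => simp [pvIsPrimeLoop]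
  | cons i rest ih =>
      rw [pvIsPrimeLoop]
      by_cases h : PySem.Int.mod x i = 0
      · simp [h]
      · simp [h, ih]

-- A's inner primality test is primality
theorem pvIsPrime_iff (x : Int) (hx : 2 ≤ x) :
    pvIsPrime x = true ↔ Nat.Prime x.toNat := by
  have hdiv : PySem.Int.floordiv x 2 = x / 2 := PySem.Int.floordiv_eq_ediv_of_pos (by omega)
  have hx2 : (x.toNat : Int) = x := Int.toNat_of_nonneg (by omega)
  rw [pvIsPrime, pvIsPrimeLoop_iff, hdiv]
  constructor
  · intro hall
    by_contra hnp
    have hne1 : x.toNat ≠ 1 := by omega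
    have hpf := Nat.minFac_prime hne1
    have hpd : x.toNat.minFac ∣ x.toNat := Nat.minFac_dvd _
    have h2f : 2 ≤ x.toNat.minFac := hpf.two_le
    have hle : x.toNat.minFac ≤ x.toNat / 2 := by
      calc x.toNat.minFac ≤ x.toNat / x.toNat.minFac := Nat.minFac_le_div (by omega) hnp
        _ ≤ x.toNat / 2 := Nat.div_le_div_left h2f (by omega)
    have hmem : ((x.toNat.minFac : Int)) ∈ PySem.List.pyRange 2 (x / 2 + 1) 1 := by
      rw [PySem.List.mem_pyRange_one]
      constructor
      · exact_mod_cast h2f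
      · have : ((x.toNat / 2 : Nat) : Int) = x / 2 := by rw [Int.natCast_div, hx2]; rfl
        omega
    have := hall _ hmem
    rw [PySem.Int.mod_eq_zero_iff_dvd] at this
    exact this (by rw [← hx2]; exact_mod_cast hpd)
  · intro hp i hi hmod
    rw [PySem.List.mem_pyRange_one] at hi
    rw [PySem.Int.mod_eq_zero_iff_dvd] at hmod
    have hidvd : i.toNat ∣ x.toNat := by
      rw [← Int.natCast_dvd_natCast, hx2, Int.toNat_of_nonneg (by omega)]
      exact hmod
    rcases hp.eq_one_or_self_of_dvd _ hidvd with h1 | h1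
    · omega
    · -- i = x, but i ≤ x/2 < x
      have : ((x.toNat / 2 : Nat) : Int) = x / 2 := by rw [Int.natCast_div, hx2]; rfl
      omega

-- the body condition of A's scan, as a proposition
theorem pvCond_iff (a b i : Int) (hi : 2 ≤ i) :
    (PySem.Int.mod a i == 0 && PySem.Int.mod b i == 0 && pvIsPrime i) = true ↔
      (i ∣ a ∧ i ∣ b ∧ Nat.Prime i.toNat) := by
  simp [Bool.and_eq_true, beq_iff_eq, PySem.Int.mod_eq_zero_iff_dvd, pvIsPrime_iff i hi,
    and_assoc]

theorem pvFindA_none (a b : Int) (L : List Int)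
    (h : ∀ i ∈ L, ¬ (PySem.Int.mod a i == 0 && PySem.Int.mod b i == 0 && pvIsPrime i) = true) :
    pvFindA a b L = -1 := by
  induction L with
  | nil => rfl
  | cons i rest ih =>
      rw [pvFindA]
      rw [if_neg (h i (List.mem_cons_self ..))]
      exact ih (fun j hj => h j (List.mem_cons_of_mem _ hj))

theorem pvFindA_max (a b : Int) (L : List Int) (hsort : L.Pairwise (· > ·)) (q : Int)
    (hmem : q ∈ L)
    (hQ : (PySem.Int.mod a q == 0 && PySem.Int.mod b q == 0 && pvIsPrime q) = true)
    (hmax : ∀ i ∈ L, (PySem.Int.mod a i == 0 && PySem.Int.mod b i == 0 && pvIsPrime i) = true → i ≤ q) :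
    pvFindA a b L = q := by
  induction L with
  | nil => cases hmem
  | cons i rest ih =>
      rw [pvFindA]
      rcases List.mem_cons.1 hmem with hqi | hqrest
      · subst hqi; rw [if_pos hQ]
      · have higt : i > q := (List.pairwise_cons.1 hsort).1 q hqrest
        have : ¬ (PySem.Int.mod a i == 0 && PySem.Int.mod b i == 0 && pvIsPrime i) = true := by
          intro hc
          exact absurd (hmax i (List.mem_cons_self ..) hc) (by omega)
        rw [if_neg this]
        exact ih (List.pairwise_cons.1 hsort).2 hqrest
          (fun j hj hc => hmax j (List.mem_cons_of_mem _ hj) hc)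


-- B's port returns the largest prime factor of gcd(a,b) whenever gcd ≥ 2
theorem pvAlt_eq (a b : Int) (hg : 2 ≤ Int.gcd a b) :
    ∃ q : Nat, q.Prime ∧ q ∣ Int.gcd a b ∧ (∀ p : Nat, p.Prime → p ∣ Int.gcd a b → p ≤ q) ∧
      greatestCommonPrimeDivisor_alt a b = (q : Int) := by
  have hne : (Int.gcd a b).primeFactors.Nonempty := Nat.nonempty_primeFactors.mpr (by omega)
  have hqmem := (Int.gcd a b).primeFactors.max'_mem hne
  rw [Nat.mem_primeFactors] at hqmem
  refine ⟨(Int.gcd a b).primeFactors.max' hne, hqmem.1, hqmem.2.1, ?_, ?_⟩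
  · intro p hp hpd
    exact Finset.le_max' _ p (Nat.mem_primeFactors.mpr ⟨hp, hpd, by omega⟩)
  · rw [greatestCommonPrimeDivisor_alt, pvGcd_eq_gcd]
    rw [show Nat.gcd a.natAbs b.natAbs = Int.gcd a b from rfl]
    exact pvLpf_eq _ 2 _ _ hqmem.1 (le_refl 2) (fun p hp _ => hp.two_le) hqmem.2.1
      (fun p hp hpd => Finset.le_max' _ p (Nat.mem_primeFactors.mpr ⟨hp, hpd, by omega⟩))

theorem pvScan_sorted (m : Int) :
    ((PySem.List.pyRange 2 m 1).reverse).Pairwise (· > ·) := by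
  rw [List.pairwise_reverse]
  exact PySem.List.pairwise_lt_pyRange_one 2 m

theorem pvDvd_cast (i : Int) (x : Int) (hi : 0 ≤ i) (h : i ∣ x) : ((i.toNat : Int)) ∣ x := by
  rwa [Int.toNat_of_nonneg hi]

-- ===== VERDICT (by name: the statement is the Claim_ definition above) =====
theorem greatestCommonPrimeDivisor_spec : Claim_unchanged_greatestCommonPrimeDivisor := by
  intro a b _ hnd
  by_cases hg : 2 ≤ Int.gcd a b
  · have hm : ¬(min a b ≤ 2 ∨ (Nat.Prime (min a b).toNat ∧ min a b ∣ a ∧ min a b ∣ b)) :=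
      fun h => hnd ⟨hg, h⟩
    push Not at hm
    obtain ⟨hm2, hmrest⟩ := hm
    have hmina := min_le_left a b
    have hminb := min_le_right a b
    have ha0 : 0 < a := by omega
    have hb0 : 0 < b := by omega
    obtain ⟨q, hqp, hqg, hqmax, halt⟩ := pvAlt_eq a b hg
    rw [halt]
    have hq2 : 2 ≤ q := hqp.two_le
    have hqa : (q : Int) ∣ a := (Int.natCast_dvd_natCast.mpr hqg).trans (Int.gcd_dvd_left a b)
    have hqb : (q : Int) ∣ b := (Int.natCast_dvd_natCast.mpr hqg).trans (Int.gcd_dvd_right a b)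
    have hga : (Int.gcd a b : Int) ≤ a := Int.le_of_dvd ha0 (Int.gcd_dvd_left a b)
    have hgb : (Int.gcd a b : Int) ≤ b := Int.le_of_dvd hb0 (Int.gcd_dvd_right a b)
    have hqle : (q : Int) ≤ (Int.gcd a b : Int) := by
      exact_mod_cast Nat.le_of_dvd (by omega) hqg
    have hqlt : (q : Int) < min a b := by
      rcases lt_or_eq_of_le (le_min (hqle.trans hga) (hqle.trans hgb)) with h | h
      · exact h
      · exfalso
        apply hmrest
        · rw [← h]; simpa using hqp
        · rw [← h]; exact hqa
        · rw [← h]; exact hqb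
    apply pvFindA_max a b _ (pvScan_sorted (min a b)) (q : Int)
    · rw [List.mem_reverse, PySem.List.mem_pyRange_one]
      exact ⟨by exact_mod_cast hq2, hqlt⟩
    · exact (pvCond_iff a b (q : Int) (by exact_mod_cast hq2)).mpr
        ⟨hqa, hqb, by simpa using hqp⟩
    · intro i hi hQi
      rw [List.mem_reverse, PySem.List.mem_pyRange_one] at hi
      obtain ⟨hia, hib, hip⟩ := (pvCond_iff a b i hi.1).mp hQi
      have hidvd : i.toNat ∣ Int.gcd a b :=
        Int.dvd_gcd (pvDvd_cast i a (by omega) hia) (pvDvd_cast i b (by omega) hib)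
      have := hqmax i.toNat hip hidvd
      omega
  · -- gcd(a,b) ≤ 1: both sides return -1
    have hA : greatestCommonPrimeDivisor a b = -1 := by
      apply pvFindA_none
      intro i hi hQ
      rw [List.mem_reverse, PySem.List.mem_pyRange_one] at hi
      obtain ⟨hia, hib, hip⟩ := (pvCond_iff a b i hi.1).mp hQ
      have hidvd : i.toNat ∣ Int.gcd a b :=
        Int.dvd_gcd (pvDvd_cast i a (by omega) hia) (pvDvd_cast i b (by omega) hib)
      rcases (show Int.gcd a b = 0 ∨ Int.gcd a b = 1 by omega) with h0 | h1
      · obtain ⟨rfl, rfl⟩ := Int.gcd_eq_zero_iff.mp h0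
        simp at hi
        omega
      · rw [h1] at hidvd
        have := Nat.eq_one_of_dvd_one hidvd
        omega
    have hB : greatestCommonPrimeDivisor_alt a b = -1 := by
      rw [greatestCommonPrimeDivisor_alt, pvGcd_eq_gcd]
      have hcast : Nat.gcd a.natAbs b.natAbs = Int.gcd a b := rfl
      rw [hcast]
      rcases (show Int.gcd a b = 0 ∨ Int.gcd a b = 1 by omega) with h | h
      · rw [h]; exact pvLpf_zero (-1)
      · rw [h]; exact pvLpf_one 2 (-1) (le_refl 2)
    rw [hA, hB]

theorem greatestCommonPrimeDivisor_changed : Claim_changed_greatestCommonPrimeDivisor := by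
  unfold Claim_changed_greatestCommonPrimeDivisor
  refine ⟨by decide, by decide, by decide, ?_, by decide⟩
  show pvLpf (pvGcd 7 7) 2 (-1) = 7
  have g1 : pvGcd 7 7 = 7 := by
    rw [pvGcd]; norm_num
    rw [pvGcd]; norm_num
  have l1 : pvLpf 7 2 (-1) = pvLpf 7 3 (-1) := by
    rw [pvLpf]; norm_num
  have l2 : pvLpf 7 3 (-1) = 7 := by
    rw [pvLpf]; norm_num
  rw [g1, l1, l2]

theorem greatestCommonPrimeDivisor_tight : Claim_exact_greatestCommonPrimeDivisor := by
  intro a b _ hD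
  obtain ⟨hg, hcase⟩ := hD
  obtain ⟨q, hqp, hqg, hqmax, halt⟩ := pvAlt_eq a b hg
  have hA : greatestCommonPrimeDivisor a b = -1 := by
    by_cases hm2 : min a b ≤ 2
    · rw [greatestCommonPrimeDivisor, PySem.List.pyRange_one_eq_nil hm2]
      rfl
    · rcases hcase with hle | ⟨hmp, hma, hmb⟩
      · omega
      · have hmina := min_le_left a b
        have hminb := min_le_right a b
        have ha0 : 0 < a := by omega
        have hb0 : 0 < b := by omega
        have hmt : (min a b).toNat ∣ Int.gcd a b :=
          Int.dvd_gcd (pvDvd_cast _ a (by omega) hma) (pvDvd_cast _ b (by omega) hmb)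
        have hga : (Int.gcd a b : Int) ≤ a := Int.le_of_dvd ha0 (Int.gcd_dvd_left a b)
        have hgb : (Int.gcd a b : Int) ≤ b := Int.le_of_dvd hb0 (Int.gcd_dvd_right a b)
        have hgeq : Int.gcd a b = (min a b).toNat :=
          le_antisymm (by omega) (Nat.le_of_dvd (by omega) hmt)
        apply pvFindA_none
        intro i hi hQ
        rw [List.mem_reverse, PySem.List.mem_pyRange_one] at hi
        obtain ⟨hia, hib, hip⟩ := (pvCond_iff a b i hi.1).mp hQ
        have hidvd : i.toNat ∣ Int.gcd a b :=
          Int.dvd_gcd (pvDvd_cast i a (by omega) hia) (pvDvd_cast i b (by omega) hib)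
        rw [hgeq] at hidvd
        have := (Nat.prime_dvd_prime_iff_eq hip hmp).mp hidvd
        omega
  rw [hA, halt]
  have := hqp.two_le
  omega
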